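-- pv_equiv track=rewrite | github.com/namanrungta/arbiter_wrr_design | tests/test_arbiter_hidden.py | get_grant_index
-- ===== SOURCE A (Python) =====
-- def get_grant_index(o_gnt_val, num_clients):
--     try:
--         val = int(o_gnt_val)
--     except ValueError:
--         return -1
--     if val == 0: return -1
--     if (val & (val - 1)) != 0: return -2
--     for i in range(num_clients):
--         if (val >> i) & 1: return i
--     return -1
-- ===== SOURCE B (Python) =====
-- def get_grant_index(o_gnt_val, num_clients):
--     try:
--         val = int(o_gnt_val)
--     except ValueError:
--         return -1
--     if val == 0:
--         return -1
--     if val & (val - 1):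
--         return -2
--     idx = val.bit_length() - 1
--     return idx if idx < num_clients else -1
-- ===== Notes on version B (the rewrite author's own statement) =====
-- stated objective: faster
-- what changed: Replaced the O(num_clients) bit-scan loop with the closed form idx = val.bit_length() - 1 (valid once the guards establish val is a positive power of two), returning idx if idx < num_clients else -1.
import Mathlib
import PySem

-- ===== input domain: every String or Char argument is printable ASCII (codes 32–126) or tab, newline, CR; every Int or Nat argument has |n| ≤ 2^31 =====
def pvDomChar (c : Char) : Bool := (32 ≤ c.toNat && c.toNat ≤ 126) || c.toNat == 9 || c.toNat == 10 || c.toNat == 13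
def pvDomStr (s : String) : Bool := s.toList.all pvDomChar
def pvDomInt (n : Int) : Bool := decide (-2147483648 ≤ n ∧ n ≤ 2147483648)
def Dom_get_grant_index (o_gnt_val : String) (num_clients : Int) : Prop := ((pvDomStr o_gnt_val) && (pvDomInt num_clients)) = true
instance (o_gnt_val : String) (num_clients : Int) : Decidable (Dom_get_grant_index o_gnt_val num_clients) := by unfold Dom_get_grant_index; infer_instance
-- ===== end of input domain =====

-- B replaces A's O(num_clients) bit-scan loop by the closed form bit_length(val) - 1 (objective: faster).

-- ===== PORT A =====
-- A's for-loop over range(num_clients); every i drawn from pyRange 0 n 1 is ≥ 0,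
-- so `i.toNat` is exact for Python's `val >> i` (Python would raise only for i < 0).
def pvScanA (val : Int) : List Int → Int
  | [] => -1
  | i :: rest => if PySem.Int.band (val >>> i.toNat) 1 ≠ 0 then i else pvScanA val rest

def get_grant_index (o_gnt_val : String) (num_clients : Int) : Int :=
  match PySem.Int.ofStr? o_gnt_val with
  | none => -1                                      -- except ValueError: return -1
  | some val =>
    if val = 0 then -1
    else if PySem.Int.band val (val - 1) ≠ 0 then -2
    else pvScanA val (PySem.List.pyRange 0 num_clients 1)

-- ===== PORT B =====
def get_grant_index_alt (o_gnt_val : String) (num_clients : Int) : Int :=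
  match PySem.Int.ofStr? o_gnt_val with
  | none => -1
  | some val =>
    if val = 0 then -1
    else if PySem.Int.band val (val - 1) ≠ 0 then -2
    else
      let idx : Int := (PySem.Int.bitLength val : Int) - 1
      if idx < num_clients then idx else -1

-- ===== PRECONDITION & SPEC =====
def Spec_get_grant_index (o_gnt_val : String) (num_clients : Int) (out : Int) : Prop := out = get_grant_index_alt o_gnt_val num_clients
instance (o_gnt_val : String) (num_clients : Int) (out : Int) : Decidable (Spec_get_grant_index o_gnt_val num_clients out) := by unfold Spec_get_grant_index; infer_instance

-- ===== CLAIM (what is proved, stated in full; the proofs are below) =====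
def Claim_equal_get_grant_index : Prop := ∀ (o_gnt_val : String) (num_clients : Int), Dom_get_grant_index o_gnt_val num_clients → Spec_get_grant_index o_gnt_val num_clients (get_grant_index o_gnt_val num_clients)

-- ===== LEMMAS AND PROOFS =====

-- A nonzero Nat whose n & (n-1) is 0 is the power of two 2^(log2 n).
theorem pv_nat_pow2 (n : Nat) (hn : n ≠ 0) (h : n &&& (n - 1) = 0) : n = 2 ^ Nat.log2 n := by
  set k := Nat.log2 n with hk
  have h1 : 2 ^ k ≤ n := Nat.log2_self_le hn
  have h2 : n < 2 ^ (k + 1) := Nat.lt_log2_self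
  by_contra hne
  have hgt : 2 ^ k < n := lt_of_le_of_ne h1 (fun e => hne e.symm)
  have ht1 : n.testBit k = true := by
    rw [Nat.testBit_eq_decide_div_mod_eq]
    have : n / 2 ^ k = 1 :=
      Nat.div_eq_of_lt_le (by omega) (by rw [pow_succ] at h2; omega)
    simp [this]
  have ht2 : (n - 1).testBit k = true := by
    rw [Nat.testBit_eq_decide_div_mod_eq]
    have : (n - 1) / 2 ^ k = 1 :=
      Nat.div_eq_of_lt_le (by omega) (by rw [pow_succ] at h2; omega)
    simp [this]
  have : (n &&& (n - 1)).testBit k = true := by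
    rw [Nat.testBit_and, ht1, ht2]; rfl
  rw [h] at this
  simp [Nat.zero_testBit] at this

-- Positive-power-of-two characterisation of A's/B's third guard.
theorem pv_pow2_of_guards (val : Int) (hv : val ≠ 0) (h : PySem.Int.band val (val - 1) = 0) :
    ∃ k : Nat, val = ((2 ^ k : Nat) : Int) := by
  cases val with
  | ofNat n =>
    have hn : n ≠ 0 := by simpa using hv
    rw [Int.ofNat_eq_natCast] at h ⊢
    have hcast : ((n : Int)) - 1 = ((n - 1 : Nat) : Int) := by omega
    rw [hcast, PySem.Int.band_natCast] at h
    have : n &&& (n - 1) = 0 := by exact_mod_cast h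
    exact ⟨Nat.log2 n, by exact_mod_cast pv_nat_pow2 n hn this⟩
  | negSucc m =>
    exfalso
    have hneg : Int.negSucc m - 1 = Int.negSucc (m + 1) := by
      simp [Int.negSucc_eq]; ring
    rw [hneg] at h
    have : PySem.Int.band (Int.negSucc m) (Int.negSucc (m + 1)) = -((m ||| (m + 1) : Nat) : Int) - 1 := by
      simp [PySem.Int.band]
    rw [this] at h
    omega

-- bit_length of 2^k is k + 1.
theorem pv_bitLength_pow2 (k : Nat) : PySem.Int.bitLength ((2 ^ k : Nat) : Int) = k + 1 := by
  set bl := PySem.Int.bitLength ((2 ^ k : Nat) : Int) with hbl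
  have habs : (((2 ^ k : Nat) : Int)).natAbs = 2 ^ k := by simp
  have h1 : 2 ^ k < 2 ^ bl := by
    have := PySem.Int.lt_two_pow_bitLength ((2 ^ k : Nat) : Int); rwa [habs] at this
  have h2 : 2 ^ (bl - 1) ≤ 2 ^ k := by
    have := PySem.Int.two_pow_bitLength_le ((2 ^ k : Nat) : Int) (by positivity)
    rwa [habs] at this
  have hk1 : k < bl := (Nat.pow_lt_pow_iff_right (by norm_num)).mp h1
  have hk2 : bl - 1 ≤ k := (Nat.pow_le_pow_iff_right (by norm_num)).mp h2
  omega

-- The scan predicate fires exactly at bit k.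
theorem pv_pred_iff (k : Nat) (i : Int) (hi : 0 ≤ i) :
    PySem.Int.band (((2 ^ k : Nat) : Int) >>> i.toNat) 1 ≠ 0 ↔ i = (k : Int) := by
  have hshift : (((2 ^ k : Nat) : Int) >>> i.toNat) = ((2 ^ k >>> i.toNat : Nat) : Int) := rfl
  rw [hshift, show (1:Int) = ((1:Nat):Int) from rfl, PySem.Int.band_natCast, Nat.and_one_is_mod, Nat.shiftRight_eq_div_pow]
  constructor
  · intro h
    by_contra hne
    apply h
    have hik : i.toNat ≠ k := fun e => hne (by omega)
    have hz : 2 ^ k / 2 ^ i.toNat % 2 = 0 := by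
      rcases Nat.lt_or_ge i.toNat k with hlt | hge
      · -- i.toNat < k : 2^k / 2^i = 2^(k - i) is even
        have hd : 2 ^ k / 2 ^ i.toNat = 2 ^ (k - i.toNat) := Nat.pow_div (by omega) (by norm_num)
        obtain ⟨s, hs⟩ : ∃ s, k - i.toNat = s + 1 := ⟨k - i.toNat - 1, by omega⟩
        rw [hd, hs, pow_succ]
        exact Nat.mul_mod_left _ 2
      · -- i.toNat > k : quotient is 0
        have hgt : k < i.toNat := by omega
        have : 2 ^ k / 2 ^ i.toNat = 0 :=
          Nat.div_eq_of_lt (Nat.pow_lt_pow_right (by norm_num) hgt)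
        simp [this]
    simp [hz]
  · intro h
    subst h
    simp [Nat.div_self (Nat.two_pow_pos k)]

theorem pv_scan_eq (k : Nat) (l : List Int) (hpos : ∀ i ∈ l, 0 ≤ i) :
    pvScanA ((2 ^ k : Nat) : Int) l = if (k : Int) ∈ l then (k : Int) else -1 := by
  induction l with
  | nil => simp [pvScanA]
  | cons i rest ih =>
    have hi : 0 ≤ i := hpos i (List.mem_cons_self)
    have hrest : ∀ j ∈ rest, 0 ≤ j := fun j hj => hpos j (List.mem_cons_of_mem i hj)
    simp only [pvScanA]
    by_cases hk : i = (k : Int)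
    · rw [if_pos ((pv_pred_iff k i hi).mpr hk), hk]
      simp
    · rw [if_neg (fun hpred => hk ((pv_pred_iff k i hi).mp hpred)), ih hrest]
      have : ((k : Int) ∈ i :: rest) ↔ ((k : Int) ∈ rest) := by
        simp [List.mem_cons]; intro h; exact absurd h.symm hk
      simp only [List.mem_cons]
      by_cases hm : (k : Int) ∈ rest
      · simp [hm]
      · simp [hm]; intro h; exact absurd h.symm hk

-- ===== VERDICT (by name: the statement is the Claim_ definition above) =====
theorem get_grant_index_spec : Claim_equal_get_grant_index := by
  intro s n _
  unfold Spec_get_grant_index get_grant_index get_grant_index_alt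
  cases hs : PySem.Int.ofStr? s with
  | none => rfl
  | some val =>
    simp only
    by_cases hv : val = 0
    · simp [hv]
    · rw [if_neg hv, if_neg hv]
      by_cases hb : PySem.Int.band val (val - 1) ≠ 0
      · rw [if_pos hb, if_pos hb]
      · rw [if_neg hb, if_neg hb]
        rw [not_not] at hb
        obtain ⟨k, hk⟩ := pv_pow2_of_guards val hv hb
        subst hk
        rw [pv_scan_eq k _ (fun i hi => ((PySem.List.mem_pyRange_one).mp hi).1),
            pv_bitLength_pow2]
        have hmem : ((k : Int) ∈ PySem.List.pyRange 0 n 1) ↔ (k : Int) < n := by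
          rw [PySem.List.mem_pyRange_one]
          constructor
          · exact fun h => h.2
          · exact fun h => ⟨by positivity, h⟩
        simp only [hmem]
        have : ((k : Int) + 1 - 1) = (k : Int) := by ring
        push_cast
        rw [this]
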